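-- pv_equiv track=rewrite | github.com/rahul38888/coding_practice | src/practices/practice/string_ignorance/script.py | string_ignorance
-- ===== SOURCE A (Python) =====
-- def string_ignorance(s):
--     tracker = set()
--     result = ""
--     for c in s:
--         try:
--             tracker.remove(c.lower())
--         except KeyError:
--             tracker.add(c.lower())
--             result += c
--     return result
-- ===== SOURCE B (Python) =====
-- def string_ignorance(s):
--     positions = {}
--     for i, c in enumerate(s):
--         positions.setdefault(c.lower(), []).append(i)
--     keep = set()
--     for idxs in positions.values():
--         for j, idx in enumerate(idxs):
--             if j % 2 == 0:
--                 keep.add(idx)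
--     return ''.join(c for i, c in enumerate(s) if i in keep)
-- ===== Notes on version B (the rewrite author's own statement) =====
-- stated objective: alternative
-- what changed: Replaces the single-pass running toggle set with an index-then-gather decomposition: one pass groups the indices of each lowercased character, the even-ranked index of every group goes into a keep set, and the output is gathered from the original string at the kept indices.
import Mathlib
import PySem

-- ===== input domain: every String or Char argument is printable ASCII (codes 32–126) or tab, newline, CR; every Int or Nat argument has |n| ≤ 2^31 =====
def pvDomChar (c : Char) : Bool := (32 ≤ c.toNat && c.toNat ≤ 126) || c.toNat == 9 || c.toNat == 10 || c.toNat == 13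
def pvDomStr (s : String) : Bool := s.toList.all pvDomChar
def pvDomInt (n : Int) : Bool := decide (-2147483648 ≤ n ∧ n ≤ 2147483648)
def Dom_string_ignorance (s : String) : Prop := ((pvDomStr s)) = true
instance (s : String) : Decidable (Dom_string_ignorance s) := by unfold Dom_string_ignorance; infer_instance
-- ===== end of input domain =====

-- B replaces A's running toggle set with a group-indices-then-gather decomposition (same cost; no speed claim).

-- ===== PORT A =====
-- for c in s: try tracker.remove(c.lower()) except KeyError: tracker.add(c.lower()); result += c
def siGoA : List Char → PySem.Set Char → List Char → List Char
  | [], _, res => res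
  | c :: rest, tr, res =>
    match PySem.Set.remove? tr (PySem.Chars.lowerChar c) with
    | some tr' => siGoA rest tr' res
    | none => siGoA rest (PySem.Set.add tr (PySem.Chars.lowerChar c)) (res ++ [c])

def string_ignorance (s : String) : String :=
  String.mk (siGoA s.toList PySem.Set.empty [])

-- ===== PORT B =====
-- pass 1: positions.setdefault(c.lower(), []).append(i)
def siPositions (cs : List Char) : PySem.Dict Char (List Int) :=
  (PySem.List.enumerate cs 0).foldl
    (fun d p => PySem.Dict.insert d (PySem.Chars.lowerChar p.2)
                  (PySem.Dict.getD d (PySem.Chars.lowerChar p.2) [] ++ [p.1]))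
    PySem.Dict.empty

-- pass 2 inner loop: for j, idx in enumerate(idxs): if j % 2 == 0: keep.add(idx)
def siAddEven (ks : PySem.Set Int) (idxs : List Int) : PySem.Set Int :=
  (PySem.List.enumerate idxs 0).foldl
    (fun ks p => if PySem.Int.mod p.1 2 == 0 then PySem.Set.add ks p.2 else ks) ks

def string_ignorance_alt (s : String) : String :=
  let cs := s.toList
  let positions := siPositions cs
  let keep := (PySem.Dict.values positions).foldl siAddEven PySem.Set.empty
  String.mk (((PySem.List.enumerate cs 0).filter (fun p => PySem.Set.contains keep p.1)).map (·.2))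

-- ===== PRECONDITION & SPEC =====
def Spec_string_ignorance (s : String) (out : String) : Prop := out = string_ignorance_alt s
instance (s : String) (out : String) : Decidable (Spec_string_ignorance s out) := by unfold Spec_string_ignorance; infer_instance

-- ===== CLAIM (what is proved, stated in full; the proofs are below) =====
def Claim_equal_string_ignorance : Prop := ∀ (s : String), Dom_string_ignorance s → Spec_string_ignorance s (string_ignorance s)

-- ===== LEMMAS AND PROOFS =====

-- reference: keep a char iff the number of earlier same-lowercase chars is even
def siRef : List Char → List Char → List Char
  | _, [] => []
  | pre, c :: rest =>
      (if pre.countP (fun x => PySem.Chars.lowerChar x == PySem.Chars.lowerChar c) % 2 = 0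
       then [c] else []) ++ siRef (pre ++ [c]) rest

-- A equals the reference: the tracker holds exactly the lowercased chars seen an odd number of times
lemma siGoA_eq_ref : ∀ (rest pre : List Char) (tr : PySem.Set Char) (res : List Char),
    tr.Nodup →
    (∀ d, d ∈ tr ↔ pre.countP (fun x => PySem.Chars.lowerChar x == d) % 2 = 1) →
    siGoA rest tr res = res ++ siRef pre rest
  | [], pre, tr, res, _, _ => by simp [siGoA, siRef]
  | c :: rest, pre, tr, res, hnd, htr => by
    by_cases hmem : PySem.Chars.lowerChar c ∈ tr
    · rw [siGoA, PySem.Set.remove?_of_mem hmem]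
      have hcnt : pre.countP (fun x => PySem.Chars.lowerChar x == PySem.Chars.lowerChar c) % 2 = 1 :=
        (htr _).mp hmem
      rw [siRef, if_neg (by omega), List.nil_append]
      exact siGoA_eq_ref rest (pre ++ [c]) _ res (PySem.Set.nodup_discard _ _ hnd) (by
        intro d
        rw [PySem.Set.mem_discard, htr d, List.countP_append]
        by_cases hd : d = PySem.Chars.lowerChar c
        · subst hd
          simp only [List.countP_cons, List.countP_nil, beq_self_eq_true, if_pos]
          simp
          omega
        · simp only [List.countP_cons, List.countP_nil]
          have : (PySem.Chars.lowerChar c == d) = false := by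
            simp [beq_eq_false_iff_ne]; exact fun h => hd h.symm
          simp [this, hd])
    · rw [siGoA]
      have hnone : PySem.Set.remove? tr (PySem.Chars.lowerChar c) = none :=
        (PySem.Set.remove?_eq_none_iff _ _).mpr hmem
      rw [hnone]
      have hcnt : pre.countP (fun x => PySem.Chars.lowerChar x == PySem.Chars.lowerChar c) % 2 ≠ 1 :=
        fun h => hmem ((htr _).mpr h)
      rw [siRef, if_pos (by omega)]
      rw [siGoA_eq_ref rest (pre ++ [c]) _ (res ++ [c]) (PySem.Set.nodup_add _ _ hnd) (by
        intro d
        rw [PySem.Set.mem_add, htr d, List.countP_append]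
        by_cases hd : d = PySem.Chars.lowerChar c
        · subst hd
          simp only [List.countP_cons, List.countP_nil, beq_self_eq_true, if_pos]
          simp
          omega
        · simp only [List.countP_cons, List.countP_nil]
          have : (PySem.Chars.lowerChar c == d) = false := by
            simp [beq_eq_false_iff_ne]; exact fun h => hd h.symm
          simp [this, hd])]
      simp

-- the group of a key: all indices whose lowercased char is the key, in order
def siGrp (cs : List Char) (key : Char) : List Int :=
  ((PySem.List.enumerate cs 0).filter (fun p => PySem.Chars.lowerChar p.2 == key)).map (·.1)

lemma siPos_fold (key : Char) : ∀ (l : List (Int × Char)) (d : PySem.Dict Char (List Int)),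
    PySem.Dict.getD
      (l.foldl (fun d p => PySem.Dict.insert d (PySem.Chars.lowerChar p.2)
                  (PySem.Dict.getD d (PySem.Chars.lowerChar p.2) [] ++ [p.1])) d) key []
      = PySem.Dict.getD d key [] ++ (l.filter (fun p => PySem.Chars.lowerChar p.2 == key)).map (·.1)
  | [], d => by simp
  | p :: l, d => by
    rw [List.foldl_cons, siPos_fold key l, PySem.Dict.getD_insert, List.filter_cons]
    by_cases h : PySem.Chars.lowerChar p.2 = key
    · simp [h]
    · have : (PySem.Chars.lowerChar p.2 == key) = false := by simpa using h
      simp [this, Ne.symm h]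

lemma siPositions_getD (cs : List Char) (key : Char) :
    PySem.Dict.getD (siPositions cs) key [] = siGrp cs key := by
  rw [siPositions, siGrp, siPos_fold key]
  simp

lemma siPositions_values (cs : List Char) :
    PySem.Dict.values (siPositions cs)
      = (PySem.Set.ofList (cs.map PySem.Chars.lowerChar)).map (siGrp cs) := by
  have hkeys : (siPositions cs).keys = PySem.Set.ofList (cs.map PySem.Chars.lowerChar) := by
    rw [siPositions,
      PySem.Dict.keys_foldl_insert_key (PySem.List.enumerate cs 0)
        (fun p => PySem.Chars.lowerChar p.2)
        (fun d p => PySem.Dict.getD d (PySem.Chars.lowerChar p.2) [] ++ [p.1]) PySem.Dict.empty,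
      PySem.Dict.keys_empty]
    have : (PySem.List.enumerate cs 0).map (fun p => PySem.Chars.lowerChar p.2)
        = cs.map PySem.Chars.lowerChar := by
      have := PySem.List.map_snd_enumerate cs 0
      calc (PySem.List.enumerate cs 0).map (fun p => PySem.Chars.lowerChar p.2)
          = ((PySem.List.enumerate cs 0).map (fun p => p.2)).map PySem.Chars.lowerChar := by
            rw [List.map_map]; rfl
        _ = cs.map PySem.Chars.lowerChar := by rw [this]
    rw [this, PySem.Set.ofList_eq_foldl, PySem.Set.update]
  have hnd : (siPositions cs).keys.Nodup := by
    rw [hkeys]; exact PySem.Set.nodup_ofList _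
  rw [PySem.Dict.values_eq_map_keys _ hnd [], hkeys]
  apply List.map_congr_left
  intro k _
  exact siPositions_getD cs k

lemma siAddEven_go : ∀ (idxs : List Int) (s : Int) (ks : PySem.Set Int) (x : Int),
    x ∈ (PySem.List.enumerate idxs s).foldl
          (fun ks p => if PySem.Int.mod p.1 2 == 0 then PySem.Set.add ks p.2 else ks) ks
      ↔ x ∈ ks ∨ ∃ j : Nat, idxs[j]? = some x ∧ PySem.Int.mod (s + j) 2 = 0
  | [], s, ks, x => by simp [PySem.List.enumerate]
  | a :: idxs, s, ks, x => by
    rw [PySem.List.enumerate_cons, List.foldl_cons, siAddEven_go idxs (s + 1)]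
    constructor
    · rintro (hk | ⟨j, hj, hm⟩)
      · by_cases hm : PySem.Int.mod s 2 = 0
        · simp only [hm] at hk
          simp only [beq_self_eq_true, if_pos] at hk
          rcases (PySem.Set.mem_add _ _ _).mp hk with h | h
          · exact Or.inl h
          · exact Or.inr ⟨0, by simp [h], by simpa using hm⟩
        · have : (PySem.Int.mod s 2 == 0) = false := by simpa using hm
          simp only [this] at hk
          exact Or.inl hk
      · exact Or.inr ⟨j + 1, by simpa using hj,
          by rw [show s + 1 + (j:Int) = s + (j+1:Nat) by push_cast; ring] at hm; exact hm⟩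
    · rintro (hk | ⟨j, hj, hm⟩)
      · left; split
        · exact (PySem.Set.mem_add _ _ _).mpr (Or.inl hk)
        · exact hk
      · match j, hj with
        | 0, hj =>
          left
          have hx : a = x := by simpa using hj
          have : (PySem.Int.mod s 2 == 0) = true := by simpa using hm
          rw [this, if_pos rfl]
          exact (PySem.Set.mem_add _ _ _).mpr (Or.inr hx.symm)
        | j + 1, hj =>
          right
          exact ⟨j, by simpa using hj,
            by rw [show s + 1 + (j:Int) = s + (j+1:Nat) by push_cast; ring]; exact hm⟩

lemma siAddEven_mem (idxs : List Int) (ks : PySem.Set Int) (x : Int) :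
    x ∈ siAddEven ks idxs ↔ x ∈ ks ∨ ∃ j : Nat, idxs[j]? = some x ∧ j % 2 = 0 := by
  rw [siAddEven, siAddEven_go]
  constructor <;> rintro (h | ⟨j, hj, hm⟩)
  · exact Or.inl h
  · refine Or.inr ⟨j, hj, ?_⟩
    rw [PySem.Int.mod_eq_emod_of_pos (by norm_num)] at hm
    omega
  · exact Or.inl h
  · refine Or.inr ⟨j, hj, ?_⟩
    rw [PySem.Int.mod_eq_emod_of_pos (by norm_num)]
    omega

lemma siKeep_mem : ∀ (vs : List (List Int)) (ks : PySem.Set Int) (x : Int),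
    x ∈ vs.foldl siAddEven ks ↔
      x ∈ ks ∨ ∃ idxs ∈ vs, ∃ j : Nat, idxs[j]? = some x ∧ j % 2 = 0
  | [], ks, x => by simp
  | v :: vs, ks, x => by
    rw [List.foldl_cons, siKeep_mem vs, siAddEven_mem]
    simp only [List.mem_cons]
    constructor
    · rintro ((h | h) | ⟨idxs, hi, h⟩)
      · exact Or.inl h
      · exact Or.inr ⟨v, Or.inl rfl, h⟩
      · exact Or.inr ⟨idxs, Or.inr hi, h⟩
    · rintro (h | ⟨idxs, (rfl | hi), h⟩)
      · exact Or.inl (Or.inl h)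
      · exact Or.inl (Or.inr h)
      · exact Or.inr ⟨idxs, hi, h⟩

lemma siGrp_not_mem (cs : List Char) (k : Nat) (key : Char)
    (hne : key ≠ PySem.Chars.lowerChar (cs.getD k ' ')) : (k : Int) ∉ siGrp cs key := by
  intro hmem
  rw [siGrp] at hmem
  obtain ⟨p, hp, hfst⟩ := List.mem_map.mp hmem
  obtain ⟨hpe, hkey⟩ := List.mem_filter.mp hp
  obtain ⟨j, hj, rfl⟩ := (PySem.List.mem_enumerate_iff _ _ _).mp hpe
  simp only [zero_add] at hfst
  have : j = k := by exact_mod_cast hfst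
  subst this
  apply hne
  have := beq_iff_eq.mp hkey
  rw [← this]
  congr 1
  exact (List.getD_eq_getElem _ _ hj).symm

-- countP over enumerate equals countP over the list
lemma countP_enumerate (pred : Char → Bool) (t : List Char) (s : Int) :
    (PySem.List.enumerate t s).countP (fun p => pred p.2) = t.countP pred := by
  have : t.countP pred = ((PySem.List.enumerate t s).map (fun p => p.2)).countP pred := by
    rw [PySem.List.map_snd_enumerate]
  rw [this, List.countP_map]
  rfl

lemma siGrp_split (cs : List Char) (k : Nat) (hk : k < cs.length) :
    siGrp cs (PySem.Chars.lowerChar cs[k])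
      = (((PySem.List.enumerate (cs.take k) 0).filter
            (fun p => PySem.Chars.lowerChar p.2 == PySem.Chars.lowerChar cs[k])).map (·.1))
        ++ (k : Int)
        :: (((PySem.List.enumerate (cs.drop (k+1)) (k+1)).filter
            (fun p => PySem.Chars.lowerChar p.2 == PySem.Chars.lowerChar cs[k])).map (·.1)) := by
  rw [siGrp, show PySem.List.enumerate cs 0
      = PySem.List.enumerate (cs.take k ++ cs[k] :: cs.drop (k+1)) 0 by
    rw [List.getElem_cons_drop, List.take_append_drop]]
  rw [PySem.List.enumerate_append, PySem.List.enumerate_cons, List.filter_append, List.filter_cons]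
  simp only [beq_self_eq_true, if_pos]
  rw [List.map_append, List.map_cons]
  congr 2
  · simp [List.length_take, Nat.min_eq_left hk.le]
  · congr 2
    simp [List.length_take, Nat.min_eq_left hk.le]

-- the crux: index k sits in its own group exactly at position (count of earlier same-lower chars)
lemma siGrp_even_iff (cs : List Char) (k : Nat) (hk : k < cs.length) :
    (∃ j : Nat, (siGrp cs (PySem.Chars.lowerChar cs[k]))[j]? = some (k : Int) ∧ j % 2 = 0)
      ↔ (cs.take k).countP
          (fun x => PySem.Chars.lowerChar x == PySem.Chars.lowerChar cs[k]) % 2 = 0 := by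
  rw [siGrp_split cs k hk]
  set A := ((PySem.List.enumerate (cs.take k) 0).filter
      (fun p => PySem.Chars.lowerChar p.2 == PySem.Chars.lowerChar cs[k])).map (·.1) with hA
  set B := ((PySem.List.enumerate (cs.drop (k+1)) (k+1)).filter
      (fun p => PySem.Chars.lowerChar p.2 == PySem.Chars.lowerChar cs[k])).map (·.1) with hB
  have hAlen : A.length = (cs.take k).countP
      (fun x => PySem.Chars.lowerChar x == PySem.Chars.lowerChar cs[k]) := by
    rw [hA, List.length_map, ← List.countP_eq_length_filter,
      countP_enumerate (fun x => PySem.Chars.lowerChar x == PySem.Chars.lowerChar cs[k])]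
  have hAlt : ∀ x ∈ A, x < (k : Int) := by
    intro x hx
    obtain ⟨p, hp, rfl⟩ := List.mem_map.mp hx
    obtain ⟨j, hj, rfl⟩ := (PySem.List.mem_enumerate_iff _ _ _).mp (List.mem_filter.mp hp).1
    have := hj.trans_le (List.length_take_le k cs)
    simp only [zero_add]
    exact_mod_cast this
  have hBgt : ∀ x ∈ B, (k : Int) < x := by
    intro x hx
    obtain ⟨p, hp, rfl⟩ := List.mem_map.mp hx
    obtain ⟨j, hj, rfl⟩ := (PySem.List.mem_enumerate_iff _ _ _).mp (List.mem_filter.mp hp).1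
    push_cast
    omega
  have hidx : ∀ j : Nat, (A ++ (k : Int) :: B)[j]? = some (k : Int) ↔ j = A.length := by
    intro j
    rcases lt_trichotomy j A.length with h | h | h
    · rw [List.getElem?_append_left h]
      constructor
      · intro he
        exact absurd (hAlt _ (List.mem_of_getElem? he)) (lt_irrefl _)
      · omega
    · subst h
      rw [List.getElem?_append_right le_rfl]
      simp
    · rw [List.getElem?_append_right (by omega)]
      have : j - A.length = (j - A.length - 1) + 1 := by omega
      rw [this, List.getElem?_cons_succ]
      constructor
      · intro he
        exact absurd (hBgt _ (List.mem_of_getElem? he)) (lt_irrefl _)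
      · omega
  constructor
  · rintro ⟨j, hj, hpar⟩
    rw [hidx j] at hj
    omega
  · intro hpar
    refine ⟨A.length, (hidx A.length).mpr rfl, by omega⟩

lemma siRef_filter (cs : List Char) : ∀ (rest pre : List Char), pre ++ rest = cs →
    siRef pre rest
      = ((PySem.List.enumerate rest (pre.length : Int)).filter
          (fun p => decide ((cs.take p.1.toNat).countP
              (fun x => PySem.Chars.lowerChar x == PySem.Chars.lowerChar p.2) % 2 = 0))).map (·.2)
  | [], pre, h => by simp [siRef, PySem.List.enumerate]
  | c :: rest, pre, h => by
    rw [siRef, PySem.List.enumerate_cons, List.filter_cons]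
    have htake : cs.take ((pre.length : Int)).toNat = pre := by
      rw [Int.toNat_natCast, ← h, List.take_left]
    have hrec := siRef_filter cs rest (pre ++ [c]) (by simpa using h)
    rw [List.length_append] at hrec
    simp only [List.length_cons, List.length_nil, Nat.zero_add] at hrec
    have hcast : ((pre.length : Int) + 1) = ((pre.length + 1 : Nat) : Int) := by push_cast; ring
    rw [hcast] at *
    by_cases hc : pre.countP (fun x => PySem.Chars.lowerChar x == PySem.Chars.lowerChar c) % 2 = 0
    · rw [if_pos hc]
      have : (decide ((cs.take ((pre.length : Int)).toNat).countP
          (fun x => PySem.Chars.lowerChar x == PySem.Chars.lowerChar c) % 2 = 0)) = true := by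
        rw [htake]; simpa using hc
      rw [this, if_pos rfl, List.map_cons, List.singleton_append, hrec]
    · rw [if_neg hc]
      have : (decide ((cs.take ((pre.length : Int)).toNat).countP
          (fun x => PySem.Chars.lowerChar x == PySem.Chars.lowerChar c) % 2 = 0)) = false := by
        rw [htake]; simpa using hc
      rw [this, if_neg (by simp), List.nil_append]
      exact hrec

-- B's keep test agrees with the prefix-parity test at every index of the string
lemma siKeep_contains (cs : List Char) (k : Nat) (hk : k < cs.length) :
    PySem.Set.contains
        ((PySem.Dict.values (siPositions cs)).foldl siAddEven PySem.Set.empty) (k : Int)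
      = decide ((cs.take k).countP
          (fun x => PySem.Chars.lowerChar x == PySem.Chars.lowerChar cs[k]) % 2 = 0) := by
  rw [Bool.eq_iff_iff, PySem.Set.contains_iff, decide_eq_true_iff,
    siKeep_mem, siPositions_values]
  constructor
  · rintro (h | ⟨idxs, hidxs, j, hj, hpar⟩)
    · simp [PySem.Set.empty] at h
    · obtain ⟨key, hkey, rfl⟩ := List.mem_map.mp hidxs
      by_cases hne : key = PySem.Chars.lowerChar cs[k]
      · subst hne
        exact (siGrp_even_iff cs k hk).mp ⟨j, hj, hpar⟩
      · exfalso
        apply siGrp_not_mem cs k key (by rwa [List.getD_eq_getElem _ _ hk])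
        exact List.mem_of_getElem? hj
  · intro hpar
    refine Or.inr ⟨siGrp cs (PySem.Chars.lowerChar cs[k]),
      List.mem_map.mpr ⟨PySem.Chars.lowerChar cs[k], ?_, rfl⟩,
      (siGrp_even_iff cs k hk).mpr hpar⟩
    exact (PySem.Set.mem_ofList _ _).mpr (List.mem_map.mpr ⟨cs[k], cs.getElem_mem hk, rfl⟩)

-- ===== VERDICT (by name: the statement is the Claim_ definition above) =====
theorem string_ignorance_spec : Claim_equal_string_ignorance := by
  intro s _
  unfold Spec_string_ignorance string_ignorance string_ignorance_alt
  congr 1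
  rw [siGoA_eq_ref s.toList [] PySem.Set.empty [] List.nodup_nil (by
    intro d
    simp [PySem.Set.empty])]
  rw [List.nil_append, siRef_filter s.toList s.toList [] rfl]
  simp only [List.length_nil, Nat.cast_zero]
  congr 1
  apply List.filter_congr
  intro p hp
  obtain ⟨k, hk, rfl⟩ := (PySem.List.mem_enumerate_iff _ _ _).mp hp
  simp only [zero_add, Int.toNat_natCast]
  exact (siKeep_contains s.toList k hk).symm
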